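-- pv_equiv track=rewrite | github.com/dudely717/legal-doc-compare | scripts/verify-doc-compare.py | keyword_has_change
-- ===== SOURCE A (Python) =====
-- def keyword_has_change(keywords, ins_contexts, del_contexts):
--     """
--     判断关键词列表中任一词是否出现在 [INS] 或 [DEL] 的上下文中
--     返回：(found_in_ins, found_in_del, 触发关键词)
--     """
--     for kw in keywords:
--         for ctx in ins_contexts:
--             if kw in ctx:
--                 return True, False, kw
--         for ctx in del_contexts:
--             if kw in ctx:
--                 return False, True, kw
--     return False, False, None
-- ===== SOURCE B (Python) =====
-- def keyword_has_change(keywords, ins_contexts, del_contexts):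
--     """
--     判断关键词列表中任一词是否出现在 [INS] 或 [DEL] 的上下文中
--     返回：(found_in_ins, found_in_del, 触发关键词)
--     """
--     i, kwi = next(((k, kw) for k, kw in enumerate(keywords)
--                    if any(kw in c for c in ins_contexts)), (None, None))
--     j, kwj = next(((k, kw) for k, kw in enumerate(keywords)
--                    if any(kw in c for c in del_contexts)), (None, None))
--     if i is None and j is None:
--         return False, False, None
--     if j is None or (i is not None and i <= j):
--         return True, False, kwi
--     return False, True, kwj
-- ===== Notes on version B (the rewrite author's own statement) =====
-- stated objective: alternative
-- what changed: Instead of one interleaved loop that checks each keyword against ins then del contexts with early return, B independently finds the first keyword matching any ins context and the first matching any del context, then decides the result by comparing the two indices (ins wins ties).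
import Mathlib
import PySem

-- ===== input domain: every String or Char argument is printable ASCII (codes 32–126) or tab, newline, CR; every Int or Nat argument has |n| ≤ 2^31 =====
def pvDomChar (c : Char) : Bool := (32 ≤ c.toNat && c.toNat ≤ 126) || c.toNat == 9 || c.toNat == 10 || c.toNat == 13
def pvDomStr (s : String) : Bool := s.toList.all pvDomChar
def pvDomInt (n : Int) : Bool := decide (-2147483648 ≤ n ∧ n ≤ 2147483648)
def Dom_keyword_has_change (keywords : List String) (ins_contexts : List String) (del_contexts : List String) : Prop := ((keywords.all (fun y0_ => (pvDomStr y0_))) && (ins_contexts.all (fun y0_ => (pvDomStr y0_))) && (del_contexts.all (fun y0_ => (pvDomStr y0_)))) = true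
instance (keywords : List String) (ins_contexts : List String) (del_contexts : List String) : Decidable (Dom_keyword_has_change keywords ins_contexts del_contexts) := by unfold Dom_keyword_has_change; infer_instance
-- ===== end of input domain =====

-- B is an alternative decomposition of the same cost: two independent first-match
-- index scans (ins, del) combined by index comparison, replacing A's interleaved loop.

-- ===== PORT A =====
-- inner loop 'for ctx in ctxs: if kw in ctx: return …' as an early-exit recursion
def pvScanA (kw : String) : List String → Bool
  | [] => false
  | c :: cs => if PySem.Str.isIn kw c then true else pvScanA kw cs

def keyword_has_change (keywords : List String) (ins_contexts : List String) (del_contexts : List String) : Bool × Bool × Option String :=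
  match keywords with
  | [] => (false, false, none)
  | kw :: rest =>
    if pvScanA kw ins_contexts then (true, false, some kw)
    else if pvScanA kw del_contexts then (false, true, some kw)
    else keyword_has_change rest ins_contexts del_contexts

-- ===== PORT B =====
-- next(((k, kw) for k, kw in enumerate(keywords) if any(kw in c for c in ctxs)), (None, None))
def pvFirstHit (ctxs : List String) : List String → Nat → Option (Nat × String)
  | [], _ => none
  | kw :: rest, k =>
    if ctxs.any (fun c => PySem.Str.isIn kw c) then some (k, kw)
    else pvFirstHit ctxs rest (k + 1)

def keyword_has_change_alt (keywords : List String) (ins_contexts : List String) (del_contexts : List String) : Bool × Bool × Option String :=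
  match pvFirstHit ins_contexts keywords 0, pvFirstHit del_contexts keywords 0 with
  | none, none => (false, false, none)
  | some (_, kwi), none => (true, false, some kwi)
  | none, some (_, kwj) => (false, true, some kwj)
  | some (i, kwi), some (j, kwj) =>
    if i ≤ j then (true, false, some kwi) else (false, true, some kwj)

-- ===== PRECONDITION & SPEC =====
def Spec_keyword_has_change (keywords : List String) (ins_contexts : List String) (del_contexts : List String) (out : Bool × Bool × Option String) : Prop := out = keyword_has_change_alt keywords ins_contexts del_contexts
instance (keywords : List String) (ins_contexts : List String) (del_contexts : List String) (out : Bool × Bool × Option String) : Decidable (Spec_keyword_has_change keywords ins_contexts del_contexts out) := by unfold Spec_keyword_has_change; infer_instance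

-- ===== CLAIM (what is proved, stated in full; the proofs are below) =====
def Claim_equal_keyword_has_change : Prop := ∀ (keywords : List String) (ins_contexts : List String) (del_contexts : List String), Dom_keyword_has_change keywords ins_contexts del_contexts → Spec_keyword_has_change keywords ins_contexts del_contexts (keyword_has_change keywords ins_contexts del_contexts)

-- ===== LEMMAS AND PROOFS =====
theorem pvScanA_eq_any (kw : String) (cs : List String) :
    pvScanA kw cs = cs.any (fun c => PySem.Str.isIn kw c) := by
  induction cs with
  | nil => rfl
  | cons c cs ih =>
    simp only [pvScanA, List.any_cons, ih]
    by_cases h : PySem.Str.isIn kw c = true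
    · rw [if_pos h, h, Bool.true_or]
    · have h' : PySem.Str.isIn kw c = false := by simpa using h
      rw [if_neg h, h', Bool.false_or]

theorem pvFirstHit_ge (ctxs : List String) (kws : List String) (k : Nat) (i : Nat) (s : String)
    (h : pvFirstHit ctxs kws k = some (i, s)) : k ≤ i := by
  induction kws generalizing k with
  | nil => simp [pvFirstHit] at h
  | cons kw rest ih =>
    simp only [pvFirstHit] at h
    split_ifs at h
    · cases h; omega
    · exact Nat.le_of_succ_le (ih (k + 1) h)

theorem pvMain (ins_contexts del_contexts : List String) (kws : List String) (k : Nat) :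
    keyword_has_change kws ins_contexts del_contexts =
    (match pvFirstHit ins_contexts kws k, pvFirstHit del_contexts kws k with
     | none, none => (false, false, none)
     | some (_, kwi), none => (true, false, some kwi)
     | none, some (_, kwj) => (false, true, some kwj)
     | some (i, kwi), some (j, kwj) =>
       if i ≤ j then (true, false, some kwi) else (false, true, some kwj)) := by
  induction kws generalizing k with
  | nil => rfl
  | cons kw rest ih =>
    simp only [keyword_has_change, pvFirstHit, pvScanA_eq_any]
    by_cases h1 : (ins_contexts.any (fun c => PySem.Str.isIn kw c)) = true
    · rw [if_pos h1, if_pos h1]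
      by_cases h2 : (del_contexts.any (fun c => PySem.Str.isIn kw c)) = true
      · rw [if_pos h2]
        simp only [le_refl, if_pos]
      · rw [if_neg h2]
        cases hd : pvFirstHit del_contexts rest (k + 1) with
        | none => rfl
        | some p =>
          obtain ⟨j, s⟩ := p
          have hj := pvFirstHit_ge _ _ _ _ _ hd
          simp only [Nat.le_of_succ_le hj, if_pos]
    · rw [if_neg h1, if_neg h1]
      by_cases h2 : (del_contexts.any (fun c => PySem.Str.isIn kw c)) = true
      · rw [if_pos h2, if_pos h2]
        cases hi : pvFirstHit ins_contexts rest (k + 1) with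
        | none => rfl
        | some p =>
          obtain ⟨i, s⟩ := p
          have hj := pvFirstHit_ge _ _ _ _ _ hi
          have hik : ¬ i ≤ k := by omega
          simp only [hik, if_false]
      · rw [if_neg h2, if_neg h2]
        exact ih (k + 1)

-- ===== VERDICT (by name: the statement is the Claim_ definition above) =====
theorem keyword_has_change_spec : Claim_equal_keyword_has_change := by
  intro kws ins del _
  unfold Spec_keyword_has_change keyword_has_change_alt
  exact pvMain ins del kws 0
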